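-- pv_equiv track=rewrite | github.com/ArxCaeli/spacers2020 | SpacersDarkMatter/Experimental/RemoveOverlappingSpacers.py | IsOverlapped
-- ===== SOURCE A (Python) =====
-- def IsOverlapped(Spacer1, Spacer2):
--     if Spacer1 in Spacer2:
--         return True
--     if Spacer2 in Spacer1:
--         return True
--
--     OverlapThreshold = 8
--
--     for I in range(0, len(Spacer1) - OverlapThreshold + 1):
--         Substring = Spacer1[I:len(Spacer1)]
--         if Substring == Spacer2[0:len(Substring)]:
--             return True
--
--     for I in range(0, len(Spacer1) - OverlapThreshold + 1):
--         Substring = Spacer1[0:len(Spacer1) - I]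
--         if Substring == Spacer2[-len(Substring):]:
--             return True
--
--
--     return False
-- ===== SOURCE B (Python) =====
-- def _TailHeadOverlap(X, Y):
--     # True iff some suffix of X of length >= 8 is a prefix of Y.
--     # Instead of testing every shift, jump between occurrences of the 8-char
--     # anchor Y[:8] inside X using str.find, and extend only at those anchors.
--     Anchor = Y[:8]
--     I = X.find(Anchor)
--     while I != -1:
--         if X[I:] == Y[:len(X) - I]:
--             return True
--         I = X.find(Anchor, I + 1)
--     return False
--
--
-- def IsOverlapped(Spacer1, Spacer2):
--     if Spacer1 in Spacer2 or Spacer2 in Spacer1: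
--         return True
--     return _TailHeadOverlap(Spacer1, Spacer2) or _TailHeadOverlap(Spacer2, Spacer1)
-- ===== Notes on version B (the rewrite author's own statement) =====
-- stated objective: faster
-- what changed: A tests every shift with two separate quadratic slice-comparison loops; B uses one symmetric helper that jumps directly between occurrences of the 8-char anchor Y[:8] inside X via str.find and extends a full comparison only at those anchor positions.
import Mathlib
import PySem

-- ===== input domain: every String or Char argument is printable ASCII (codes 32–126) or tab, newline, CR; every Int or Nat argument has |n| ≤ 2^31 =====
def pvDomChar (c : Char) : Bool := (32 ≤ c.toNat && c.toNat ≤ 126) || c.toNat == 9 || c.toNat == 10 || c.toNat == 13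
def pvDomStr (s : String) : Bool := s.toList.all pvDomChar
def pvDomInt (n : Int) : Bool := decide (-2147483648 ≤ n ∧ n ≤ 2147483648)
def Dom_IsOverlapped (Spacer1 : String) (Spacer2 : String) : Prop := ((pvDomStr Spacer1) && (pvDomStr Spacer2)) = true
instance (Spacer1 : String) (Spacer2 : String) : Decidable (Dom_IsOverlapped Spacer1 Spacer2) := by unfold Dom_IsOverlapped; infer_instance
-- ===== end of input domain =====

-- B replaces A's two shift-by-shift overlap loops by one helper (used in both directions) that
-- jumps between occurrences of the 8-char anchor Y[:8] inside X via str.find and extends only there.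

-- ===== PORT A =====
def IsOverlapped (Spacer1 : String) (Spacer2 : String) : Bool :=
  if PySem.Str.isIn Spacer1 Spacer2 then true
  else if PySem.Str.isIn Spacer2 Spacer1 then true
  else
    let s1 := Spacer1.toList
    let s2 := Spacer2.toList
    let OverlapThreshold : Int := 8
    -- for I in range(0, len(Spacer1) - OverlapThreshold + 1): early return True = .any
    if (PySem.List.pyRange 0 ((s1.length : Int) - OverlapThreshold + 1) 1).any (fun I =>
        let Substring := PySem.List.slice s1 (some I) (some (s1.length : Int))
        Substring == PySem.List.slice s2 (some 0) (some (Substring.length : Int)))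
    then true
    else if (PySem.List.pyRange 0 ((s1.length : Int) - OverlapThreshold + 1) 1).any (fun I =>
        let Substring := PySem.List.slice s1 (some 0) (some ((s1.length : Int) - I))
        Substring == PySem.List.slice s2 (some (-(Substring.length : Int))) none)
    then true
    else false

-- ===== PORT B =====
-- the while-loop of _TailHeadOverlap; fuel only makes the recursion total (I strictly increases
-- and is bounded by |X|, proved in the lemmas below)
def pvTHLoop (X Y Anchor : List Char) : Nat → Int → Bool
  | 0, _ => false
  | fuel + 1, I =>
    if I = -1 then false
    else if PySem.List.slice X (some I) none == PySem.List.slice Y none (some ((X.length : Int) - I))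
    then true
    else pvTHLoop X Y Anchor fuel (PySem.Chars.findFrom X Anchor (I + 1) none)

def pvTailHeadOverlap (X Y : List Char) : Bool :=
  let Anchor := PySem.List.slice Y none (some 8)
  pvTHLoop X Y Anchor (X.length + 2) (PySem.Chars.find X Anchor)

def IsOverlapped_alt (Spacer1 : String) (Spacer2 : String) : Bool :=
  if PySem.Str.isIn Spacer1 Spacer2 || PySem.Str.isIn Spacer2 Spacer1 then true
  else pvTailHeadOverlap Spacer1.toList Spacer2.toList || pvTailHeadOverlap Spacer2.toList Spacer1.toList

-- ===== PRECONDITION & SPEC =====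
def Spec_IsOverlapped (Spacer1 : String) (Spacer2 : String) (out : Bool) : Prop := out = IsOverlapped_alt Spacer1 Spacer2
instance (Spacer1 : String) (Spacer2 : String) (out : Bool) : Decidable (Spec_IsOverlapped Spacer1 Spacer2 out) := by unfold Spec_IsOverlapped; infer_instance

-- ===== CLAIM (what is proved, stated in full; the proofs are below) =====
def Claim_equal_IsOverlapped : Prop := ∀ (Spacer1 : String) (Spacer2 : String), Dom_IsOverlapped Spacer1 Spacer2 → Spec_IsOverlapped Spacer1 Spacer2 (IsOverlapped Spacer1 Spacer2)

-- ===== LEMMAS AND PROOFS =====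

-- canonical form: some suffix of x of length L ≥ 8 is a prefix of y
def pvOlap (x y : List Char) : Prop :=
  ∃ L : Nat, 8 ≤ L ∧ L ≤ x.length ∧ L ≤ y.length ∧ x.drop (x.length - L) = y.take L


theorem pvOlap_firstLoop (x y : List Char) :
    ((PySem.List.pyRange 0 ((x.length : Int) - 8 + 1) 1).any (fun I =>
        let Substring := PySem.List.slice x (some I) (some (x.length : Int))
        Substring == PySem.List.slice y (some 0) (some (Substring.length : Int))) = true)
    ↔ pvOlap x y := by
  rw [List.any_eq_true]
  constructor
  · rintro ⟨I, hmem, hp⟩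
    rw [PySem.List.mem_pyRange_one] at hmem
    obtain ⟨h0, hIlt⟩ := hmem
    obtain ⟨n, rfl⟩ : ∃ n : Nat, I = (n : Int) := ⟨I.toNat, (Int.toNat_of_nonneg h0).symm⟩
    have hn8 : n + 8 ≤ x.length := by omega
    have hsl : PySem.List.slice x (some (n : Int)) (some (x.length : Int)) = x.drop n := by
      rw [PySem.List.slice_toNat x (by positivity) (by positivity)]
      simp only [Int.toNat_natCast]
      exact List.take_of_length_le (by simp)
    simp only [hsl, List.length_drop, PySem.List.slice_zero_start,
      PySem.List.slice_to_natCast, beq_iff_eq] at hp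
    have hlen := congrArg List.length hp
    simp only [List.length_drop, List.length_take] at hlen
    refine ⟨x.length - n, by omega, by omega, by omega, ?_⟩
    rw [show x.length - (x.length - n) = n by omega]
    exact hp
  · rintro ⟨L, h8, hLx, hLy, heq⟩
    refine ⟨((x.length - L : Nat) : Int), ?_, ?_⟩
    · rw [PySem.List.mem_pyRange_one]
      constructor
      · positivity
      · omega
    · have hsl : PySem.List.slice x (some ((x.length - L : Nat) : Int)) (some (x.length : Int))
          = x.drop (x.length - L) := by
        rw [PySem.List.slice_toNat x (by positivity) (by positivity)]
        simp only [Int.toNat_natCast]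
        exact List.take_of_length_le (by simp)
      simp only [hsl, List.length_drop, PySem.List.slice_zero_start,
        PySem.List.slice_to_natCast, beq_iff_eq]
      rw [show x.length - (x.length - L) = L by omega]
      exact heq

theorem pvOlap_secondLoop (x y : List Char) :
    ((PySem.List.pyRange 0 ((x.length : Int) - 8 + 1) 1).any (fun I =>
        let Substring := PySem.List.slice x (some 0) (some ((x.length : Int) - I))
        Substring == PySem.List.slice y (some (-(Substring.length : Int))) none) = true)
    ↔ pvOlap y x := by
  rw [List.any_eq_true]
  constructor
  · rintro ⟨I, hmem, hp⟩
    rw [PySem.List.mem_pyRange_one] at hmem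
    obtain ⟨h0, hIlt⟩ := hmem
    obtain ⟨n, rfl⟩ : ∃ n : Nat, I = (n : Int) := ⟨I.toNat, (Int.toNat_of_nonneg h0).symm⟩
    have hn8 : n + 8 ≤ x.length := by omega
    have hsl : PySem.List.slice x (some 0) (some ((x.length : Int) - (n : Int)))
        = x.take (x.length - n) := by
      rw [PySem.List.slice_zero_start, show ((x.length : Int) - (n : Int)) = ((x.length - n : Nat) : Int) by omega,
        PySem.List.slice_to_natCast]
    have hlt : (x.take (x.length - n)).length = x.length - n := by
      simp only [List.length_take]; omega
    simp only [hsl, hlt, beq_iff_eq] at hp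
    rw [PySem.List.slice_from_neg_natCast y (x.length - n) (by omega)] at hp
    have hlen := congrArg List.length hp
    simp only [List.length_drop, List.length_take] at hlen
    refine ⟨x.length - n, by omega, by omega, by omega, ?_⟩
    exact hp.symm
  · rintro ⟨L, h8, hLy, hLx, heq⟩
    refine ⟨((x.length - L : Nat) : Int), ?_, ?_⟩
    · rw [PySem.List.mem_pyRange_one]
      constructor
      · positivity
      · omega
    · have hsl : PySem.List.slice x (some 0) (some ((x.length : Int) - ((x.length - L : Nat) : Int)))
          = x.take L := by
        rw [PySem.List.slice_zero_start, show ((x.length : Int) - ((x.length - L : Nat) : Int)) = ((L : Nat) : Int) by omega,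
          PySem.List.slice_to_natCast]
      have hlt : (x.take L).length = L := by simp only [List.length_take]; omega
      simp only [hsl, hlt, beq_iff_eq]
      rw [PySem.List.slice_from_neg_natCast y L (by omega)]
      exact heq.symm

theorem pvTHLoop_spec (x y anchor : List Char) (hanc : anchor ≠ []) (k fuel : Nat)
    (hk : k ≤ x.length) (hfuel : x.length + 1 - k ≤ fuel) :
    (pvTHLoop x y anchor fuel (PySem.Chars.findFrom x anchor (k : Int) none) = true
    ↔ ∃ j : Nat, k ≤ j ∧ anchor <+: x.drop j ∧ x.drop j = y.take (x.length - j)) := by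
  induction fuel generalizing k with
  | zero => omega
  | succ fuel ih =>
    by_cases hr : PySem.Chars.findFrom x anchor (k : Int) none = -1
    · have hfalse : pvTHLoop x y anchor (fuel + 1) (-1) = false := by simp [pvTHLoop]
      rw [hr, hfalse]
      simp only [Bool.false_eq_true, false_iff]
      have hnin : ¬ anchor <:+: x.drop k :=
        (PySem.Chars.findFrom_natCast_eq_neg_one_iff x anchor k hk).mp hr
      rintro ⟨j, hkj, hpre, -⟩
      have hsub : x.drop j <:+ x.drop k := by
        have hd : (x.drop k).drop (j - k) = x.drop j := by
          rw [List.drop_drop]; congr 1; omega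
        rw [← hd]; exact List.drop_suffix _ _
      exact hnin (hpre.isInfix.trans hsub.isInfix)
    · obtain ⟨hkr, hpre_r, hmin⟩ := PySem.Chars.findFrom_natCast_spec x anchor k hk hr
      set r := PySem.Chars.findFrom x anchor (k : Int) none with hrdef
      have h0r : (0 : Int) ≤ r := le_trans (Int.natCast_nonneg k) hkr
      have hkrn : k ≤ r.toNat := by omega
      have hrlt : r.toNat < x.length := by
        have hle := hpre_r.length_le
        simp only [List.length_drop] at hle
        have hancpos : 0 < anchor.length := List.length_pos_of_ne_nil hanc
        omega
      have hCs1 : PySem.List.slice x (some r) none = x.drop r.toNat := PySem.List.slice_from x h0r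
      have hCs2 : PySem.List.slice y none (some ((x.length : Int) - r)) = y.take (x.length - r.toNat) := by
        rw [PySem.List.slice_to y (by omega)]
        congr 1
        omega
      simp only [pvTHLoop, if_neg hr, hCs1, hCs2, beq_iff_eq]
      by_cases hC : x.drop r.toNat = y.take (x.length - r.toNat)
      · rw [if_pos hC]
        simp only [true_iff]
        exact ⟨r.toNat, hkrn, hpre_r, hC⟩
      · rw [if_neg hC]
        rw [show r + 1 = ((r.toNat + 1 : Nat) : Int) by omega]
        rw [ih (r.toNat + 1) (by omega) (by omega)]
        constructor
        · rintro ⟨j, hj, h1, h2⟩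
          exact ⟨j, by omega, h1, h2⟩
        · rintro ⟨j, hj, h1, h2⟩
          rcases lt_trichotomy j r.toNat with h | h | h
          · exact absurd h1 (hmin j hj h)
          · exact absurd (h ▸ h2) hC
          · exact ⟨j, by omega, h1, h2⟩

theorem pvTailHeadOverlap_spec (x y : List Char) (hy : y ≠ []) (hni : ¬ y <:+: x) :
    (pvTailHeadOverlap x y = true ↔ pvOlap x y) := by
  unfold pvTailHeadOverlap
  have hanch : PySem.List.slice y none (some 8) = y.take 8 := by
    rw [show (8 : Int) = ((8 : Nat) : Int) by norm_num, PySem.List.slice_to_natCast]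
  have hanc : y.take 8 ≠ [] := by
    intro h
    have := congrArg List.length h
    simp only [List.length_take, List.length_nil] at this
    exact hy (List.eq_nil_of_length_eq_zero (by omega))
  rw [hanch]
  show pvTHLoop x y (List.take 8 y) (x.length + 2) (PySem.Chars.find x (List.take 8 y)) = true
    ↔ pvOlap x y
  rw [← PySem.Chars.findFrom_zero, show (0 : Int) = ((0 : Nat) : Int) from rfl,
    pvTHLoop_spec x y _ hanc 0 (x.length + 2) (by omega) (by omega)]
  constructor
  · rintro ⟨j, -, hpre, heq⟩
    have hjlt : j < x.length := by
      by_contra hcon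
      have hnil : x.drop j = [] := List.drop_eq_nil_of_le (by omega)
      rw [hnil] at hpre
      exact hanc (List.prefix_nil.mp hpre)
    have hlen := congrArg List.length heq
    simp only [List.length_drop, List.length_take] at hlen
    by_cases h8 : 8 ≤ y.length
    · refine ⟨x.length - j, ?_, by omega, by omega, ?_⟩
      · have := hpre.length_le
        simp only [List.length_take, List.length_drop] at this
        omega
      · rw [show x.length - (x.length - j) = j by omega]
        exact heq
    · exfalso
      have hay : y.take 8 = y := List.take_of_length_le (by omega)
      rw [hay] at hpre
      have h1 := hpre.length_le
      simp only [List.length_drop] at h1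
      have hxy : x.drop j = y := by
        rw [heq]
        exact List.take_of_length_le (by omega)
      exact hni (by rw [← hxy]; exact (List.drop_suffix _ _).isInfix)
  · rintro ⟨L, h8, hLx, hLy, heq⟩
    refine ⟨x.length - L, by omega, ?_, ?_⟩
    · have h1 : y.take 8 = (y.take L).take 8 := by
        rw [List.take_take]; congr 1; omega
      rw [h1, ← heq]
      exact List.take_prefix _ _
    · rw [show x.length - (x.length - L) = L by omega]
      exact heq

-- ===== VERDICT (by name: the statement is the Claim_ definition above) =====
theorem IsOverlapped_spec : Claim_equal_IsOverlapped := by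
  intro Spacer1 Spacer2 _
  unfold Spec_IsOverlapped IsOverlapped IsOverlapped_alt
  show (if PySem.Str.isIn Spacer1 Spacer2 = true then true
      else if PySem.Str.isIn Spacer2 Spacer1 = true then true
      else if ((PySem.List.pyRange 0 ((Spacer1.toList.length : Int) - 8 + 1) 1).any (fun I =>
          let Substring := PySem.List.slice Spacer1.toList (some I) (some (Spacer1.toList.length : Int))
          Substring == PySem.List.slice Spacer2.toList (some 0) (some (Substring.length : Int)))) = true
      then true
      else if ((PySem.List.pyRange 0 ((Spacer1.toList.length : Int) - 8 + 1) 1).any (fun I =>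
          let Substring := PySem.List.slice Spacer1.toList (some 0) (some ((Spacer1.toList.length : Int) - I))
          Substring == PySem.List.slice Spacer2.toList (some (-(Substring.length : Int))) none)) = true
      then true
      else false)
    = (if (PySem.Str.isIn Spacer1 Spacer2 || PySem.Str.isIn Spacer2 Spacer1) = true then true
      else pvTailHeadOverlap Spacer1.toList Spacer2.toList || pvTailHeadOverlap Spacer2.toList Spacer1.toList)
  by_cases h12 : PySem.Str.isIn Spacer1 Spacer2 = true
  · rw [if_pos h12, if_pos (show (PySem.Str.isIn Spacer1 Spacer2 || PySem.Str.isIn Spacer2 Spacer1) = true by rw [Bool.or_eq_true]; exact Or.inl h12)]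
  · by_cases h21 : PySem.Str.isIn Spacer2 Spacer1 = true
    · rw [if_neg h12, if_pos h21, if_pos (show (PySem.Str.isIn Spacer1 Spacer2 || PySem.Str.isIn Spacer2 Spacer1) = true by rw [Bool.or_eq_true]; exact Or.inr h21)]
    · have hinfix12 : ¬ Spacer1.toList <:+: Spacer2.toList := fun h =>
        h12 ((PySem.Str.isIn_iff_infix Spacer1 Spacer2).mpr h)
      have hinfix21 : ¬ Spacer2.toList <:+: Spacer1.toList := fun h =>
        h21 ((PySem.Str.isIn_iff_infix Spacer2 Spacer1).mpr h)
      have hne1 : Spacer1.toList ≠ [] := by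
        intro h
        exact h12 ((PySem.Str.isIn_iff_infix Spacer1 Spacer2).mpr (by rw [h]; exact List.nil_infix))
      have hne2 : Spacer2.toList ≠ [] := by
        intro h
        exact h21 ((PySem.Str.isIn_iff_infix Spacer2 Spacer1).mpr (by rw [h]; exact List.nil_infix))
      rw [if_neg h12, if_neg h21, if_neg (show ¬ ((PySem.Str.isIn Spacer1 Spacer2 || PySem.Str.isIn Spacer2 Spacer1) = true) by rw [Bool.or_eq_true]; rintro (h | h); exacts [h12 h, h21 h])]
      rw [Bool.eq_iff_iff]
      have hif : ∀ a b : Bool, (((if a = true then true else if b = true then true else false) = true)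
          ↔ (a = true ∨ b = true)) := by decide
      rw [hif]
      simp only [Bool.or_eq_true]
      rw [pvOlap_firstLoop, pvOlap_secondLoop,
        pvTailHeadOverlap_spec Spacer1.toList Spacer2.toList hne2 hinfix21,
        pvTailHeadOverlap_spec Spacer2.toList Spacer1.toList hne1 hinfix12]
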